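-- pv_equiv track=rewrite | github.com/neuxxm/leetcode | problems/788/test.py | f
-- ===== SOURCE A (Python) =====
-- def f(s):
--     map = {}
--     s1 = '0125689'
--     s2 = '0152986'
--     for i,c in enumerate(s1):
--         map[c] = s2[i]
--     buf = ''
--     for c in s:
--         if c not in map:
--             return False
--         buf += map[c]
--     return buf != s
-- ===== SOURCE B (Python) =====
-- def f(s):
--     return all(c in '0125689' for c in s) and any(c in '2569' for c in s)
-- ===== Notes on version B (the rewrite author's own statement) =====
-- stated objective: simpler
-- what changed: Replaces the rotation dict, translated buffer and string comparison with two membership scans: every char rotatable AND some char changes under rotation.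
import Mathlib
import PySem

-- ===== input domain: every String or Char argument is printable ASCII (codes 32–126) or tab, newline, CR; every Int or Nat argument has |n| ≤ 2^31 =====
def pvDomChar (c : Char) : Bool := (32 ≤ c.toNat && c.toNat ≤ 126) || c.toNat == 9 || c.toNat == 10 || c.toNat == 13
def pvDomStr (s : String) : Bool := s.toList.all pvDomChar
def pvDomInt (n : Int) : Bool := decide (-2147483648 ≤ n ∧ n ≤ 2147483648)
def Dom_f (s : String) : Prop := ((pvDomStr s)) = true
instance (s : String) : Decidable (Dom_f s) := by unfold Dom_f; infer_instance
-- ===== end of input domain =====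

-- B drops A's rotation dict and translated buffer: "all chars rotatable AND some char changes"; same O(n), simpler.

-- ===== PORT A =====
-- the dict built by `for i,c in enumerate(s1): map[c] = s2[i]`; s2[i] is always in range (equal lengths), so getD's default is never used
def fDict : PySem.Dict Char Char :=
  (PySem.List.enumerate "0125689".toList).foldl
    (fun m p => m.insert p.2 ((PySem.Str.pyGet? "0152986" p.1).getD ' ')) PySem.Dict.empty

-- `for c in s: if c not in map: return False; buf += map[c]` then `return buf != s`
def fLoop (s : String) : List Char → List Char → Bool
  | [], buf => String.ofList buf != s
  | c :: cs, buf =>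
    match fDict.get? c with
    | none => false
    | some d => fLoop s cs (buf ++ [d])

def f (s : String) : Bool := fLoop s s.toList []

-- ===== PORT B =====
def f_alt (s : String) : Bool :=
  (s.toList.all fun c => "0125689".toList.contains c) &&
  (s.toList.any fun c => "2569".toList.contains c)

-- ===== PRECONDITION & SPEC =====
def Spec_f (s : String) (out : Bool) : Prop := out = f_alt s
instance (s : String) (out : Bool) : Decidable (Spec_f s out) := by unfold Spec_f; infer_instance

-- ===== CLAIM (what is proved, stated in full; the proofs are below) =====
def Claim_equal_f : Prop := ∀ (s : String), Dom_f s → Spec_f s (f s)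


-- ===== LEMMAS AND PROOFS =====

-- proof-side abbreviations for the two membership tests and the rotation map
def pvRot (c : Char) : Bool := "0125689".toList.contains c
def pvChg (c : Char) : Bool := "2569".toList.contains c
def pvTr (c : Char) : Char :=
  if c = '2' then '5' else if c = '5' then '2' else
  if c = '6' then '9' else if c = '9' then '6' else c

lemma fDict_get? (c : Char) :
    fDict.get? c = if pvRot c then some (pvTr c) else none := by
  have h : fDict = PySem.Dict.mk
      [('0','0'),('1','1'),('2','5'),('5','2'),('6','9'),('8','8'),('9','6')] := by decide
  rw [h]
  by_cases h0 : c = '0'; · subst h0; decide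
  by_cases h1 : c = '1'; · subst h1; decide
  by_cases h2 : c = '2'; · subst h2; decide
  by_cases h5 : c = '5'; · subst h5; decide
  by_cases h6 : c = '6'; · subst h6; decide
  by_cases h8 : c = '8'; · subst h8; decide
  by_cases h9 : c = '9'; · subst h9; decide
  simp [PySem.Dict.get?, pvRot, h0, h1, h2, h5, h6, h8, h9, Ne.symm]

lemma fLoop_eq (s : String) (cs buf : List Char) :
    fLoop s cs buf =
      if cs.all pvRot then (String.ofList (buf ++ cs.map pvTr) != s) else false := by
  induction cs generalizing buf with
  | nil => simp [fLoop]
  | cons c cs ih =>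
    simp only [fLoop]
    rw [fDict_get? c]
    cases hc : pvRot c with
    | false => simp [hc]
    | true => simp [hc, ih, List.append_assoc]

lemma pvTr_ne (c : Char) (h : pvRot c = true) : (pvTr c ≠ c) ↔ pvChg c = true := by
  simp only [pvRot] at h
  simp at h
  rcases h with h | h | h | h | h | h | h <;> subst h <;> decide

lemma map_pvTr_ne (l : List Char) (h : l.all pvRot = true) :
    (l.map pvTr ≠ l) ↔ l.any pvChg = true := by
  induction l with
  | nil => simp
  | cons c cs ih =>
    simp only [List.all_cons, Bool.and_eq_true] at h
    have hfix := pvTr_ne c h.1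
    simp only [List.map_cons, List.any_cons, Bool.or_eq_true, ne_eq, List.cons.injEq, not_and]
    constructor
    · intro hne
      by_cases hc : pvTr c = c
      · right; exact (ih h.2).mp (by simpa [hc] using hne hc)
      · left; exact hfix.mp hc
    · rintro (hc | hcs)
      · intro hcc; exact absurd hcc (hfix.mpr hc)
      · intro _; exact fun hmap => absurd ((ih h.2).mpr hcs) (by simp [hmap])

-- ===== VERDICT (by name: the statement is the Claim_ definition above) =====
theorem f_spec : Claim_equal_f := by
  intro s _
  unfold Spec_f f f_alt
  rw [fLoop_eq]
  show _ = ((s.toList.all pvRot) && (s.toList.any pvChg))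
  by_cases hall : s.toList.all pvRot = true
  · simp only [hall, if_pos, List.nil_append, Bool.true_and]
    have hiff := map_pvTr_ne s.toList hall
    have key : (String.ofList (s.toList.map pvTr) = s) ↔ (s.toList.map pvTr = s.toList) := by
      constructor
      · intro h; have := congrArg String.toList h; simpa [String.toList_ofList] using this
      · intro h; rw [h, String.ofList_toList]
    rw [show (String.ofList (s.toList.map pvTr) != s)
          = decide (s.toList.map pvTr ≠ s.toList) by
        rw [Bool.eq_iff_iff]; simp [bne_iff_ne, key]]
    by_cases hne : s.toList.map pvTr ≠ s.toList
    · simp [hne, hiff.mp hne]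
    · rw [not_not] at hne
      have hany : s.toList.any pvChg = false := by
        cases hx : s.toList.any pvChg
        · rfl
        · exact absurd (hiff.mpr hx) (by simp [hne])
      simp [hne, hany]
  · simp [hall]
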